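-- pv_equiv track=rewrite | github.com/brandoneng000/LeetCode | medium/1850.py | getMinSwaps
-- ===== SOURCE A (Python) =====
-- from typing import List
--
-- def getMinSwaps(num: str, k: int) -> int:
--     def next_permu(nums: List[str]):
--         small = len(nums) - 2
--
--         while small >= 0 and nums[small] >= nums[small + 1]:
--             small -= 1
--
--         if small == -1:
--             nums.reverse()
--         else:
--             next_large = small + 1
--             for i in range(n - 1, small, -1):
--                 if nums[small] < nums[i]:
--                     next_large = i
--                     break
--
--             nums[small], nums[next_large] = nums[next_large], nums[small]
--             start = small + 1
--             nums[start:] = nums[start:][::-1]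
--         return nums
--
--
--     n = len(num)
--     original = list(num)
--     num = list(num)
--     res = 0
--
--     for _ in range(k):
--         num = next_permu(num)
--
--     for i in range(n):
--         j = num.index(original[i], i)
--         res += j - i
--         num[i: j + 1] = [num[j]] + num[i: j]
--
--     return res
-- ===== SOURCE B (Python) =====
-- def _next_perm(a):
--     # functional next-permutation: split off the non-increasing suffix,
--     # reverse it (now non-decreasing) and splice the pivot into place
--     i = len(a) - 1
--     while i > 0 and a[i - 1] >= a[i]:
--         i -= 1
--     rev = a[i:][::-1]
--     if i == 0:
--         return rev
--     prefix, pivot = a[:i - 1], a[i - 1]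
--     t = next(idx for idx, x in enumerate(rev) if x > pivot)
--     return prefix + [rev[t]] + rev[:t] + [pivot] + rev[t + 1:]
--
--
-- def getMinSwaps(num: str, k: int) -> int:
--     a = list(num)
--     for _ in range(k):
--         a = _next_perm(a)
--     res = 0
--     for c in num:
--         j = a.index(c)
--         res += j
--         a.pop(j)
--     return res
-- ===== Notes on version B (the rewrite author's own statement) =====
-- stated objective: alternative
-- what changed: B computes the next permutation functionally (reversed non-decreasing suffix + first-greater splice) instead of A's in-place swap-and-slice-reverse, and counts the adjacent swaps by index-and-pop on a shrinking list instead of A's index-with-start plus slice rotation of the full list.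
-- outside the precondition, e.g. on getMinSwaps('', 1): A raises IndexError, B raises IndexError
import Mathlib
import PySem

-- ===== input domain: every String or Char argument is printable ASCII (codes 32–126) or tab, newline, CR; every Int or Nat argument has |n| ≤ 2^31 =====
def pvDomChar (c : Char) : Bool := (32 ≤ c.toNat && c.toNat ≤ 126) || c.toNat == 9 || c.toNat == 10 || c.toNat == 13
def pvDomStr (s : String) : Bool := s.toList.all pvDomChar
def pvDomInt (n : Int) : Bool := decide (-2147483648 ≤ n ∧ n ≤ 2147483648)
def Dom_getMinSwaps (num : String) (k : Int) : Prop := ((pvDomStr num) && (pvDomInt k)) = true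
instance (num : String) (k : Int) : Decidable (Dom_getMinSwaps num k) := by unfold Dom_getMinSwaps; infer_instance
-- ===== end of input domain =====

-- B replaces A's in-place next-permutation (swap + slice-reversal) by a functional
-- splice of the reversed suffix, and A's rotation-based swap counting by a pop-based
-- count on a shrinking list; objective: alternative (same asymptotic cost).

-- ===== PORT A =====
-- while small >= 0 and nums[small] >= nums[small + 1]: small -= 1
-- (indices are in range at every call A makes, so pyGetD is exact here)
def pvAsmall (nums : List Char) (small : Int) : Int :=
  if h : 0 ≤ small ∧ PySem.List.pyGetD nums (small + 1) ' ' ≤ PySem.List.pyGetD nums small ' ' then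
    pvAsmall nums (small - 1)
  else small
termination_by (small + 1).toNat
decreasing_by obtain ⟨h1, _⟩ := h; omega

-- def next_permu(nums): …  (n is the enclosing function's n = len(num); A is only
-- ever called with nums of that same length)
def pvAnextPermu (n : Int) (nums : List Char) : List Char :=
  let small := pvAsmall nums ((nums.length : Int) - 2)
  if small = -1 then nums.reverse
  else
    -- for i in range(n - 1, small, -1): if nums[small] < nums[i]: next_large = i; break
    let next_large :=
      (((PySem.List.pyRange (n - 1) small (-1)).find? (fun i =>
          decide (PySem.List.pyGetD nums small ' ' < PySem.List.pyGetD nums i ' '))).getD (small + 1))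
    -- nums[small], nums[next_large] = nums[next_large], nums[small]
    let cs := PySem.List.pyGetD nums small ' '
    let cl := PySem.List.pyGetD nums next_large ' '
    let nums1 := PySem.List.pySetD (PySem.List.pySetD nums small cl) next_large cs
    -- nums[start:] = nums[start:][::-1]
    let start := small + 1
    PySem.List.slice nums1 none (some start) ++ (PySem.List.slice nums1 (some start) none).reverse

-- one iteration of 'for i in range(n): j = num.index(original[i], i); res += j - i; rotate'
-- num.index(c, i) = i + first index of c in num[i:]  (ValueError when absent — unreachable
-- under Pre_, num being a permutation of original; the .getD 0 is never taken)
def pvAstep (orig : List Char) (st : List Char × Int) (i : Int) : List Char × Int :=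
  let num := st.1
  let c := PySem.List.pyGetD orig i ' '
  let j : Int := i + ((PySem.List.index? (PySem.List.slice num (some i) none) c).getD 0 : Nat)
  let res := st.2 + (j - i)
  let num' := PySem.List.slice num none (some i) ++ [PySem.List.pyGetD num j ' ']
      ++ PySem.List.slice num (some i) (some j) ++ PySem.List.slice num (some (j + 1)) none
  (num', res)

def getMinSwaps (num : String) (k : Int) : Int :=
  let n : Int := (num.toList.length : Int)
  let original := num.toList
  let num0 := num.toList
  let numk := (PySem.List.pyRange 0 k 1).foldl (fun a _ => pvAnextPermu n a) num0
  ((PySem.List.pyRange 0 n 1).foldl (pvAstep original) (numk, 0)).2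

-- ===== PORT B =====
-- while i > 0 and a[i - 1] >= a[i]: i -= 1   (indices in range at every call B makes)
def pvBpivot (a : List Char) (i : Int) : Int :=
  if h : 0 < i ∧ PySem.List.pyGetD a i ' ' ≤ PySem.List.pyGetD a (i - 1) ' ' then
    pvBpivot a (i - 1)
  else i
termination_by i.toNat
decreasing_by obtain ⟨h1, _⟩ := h; omega

-- def _next_perm(a): …
def pvBnextPerm (a : List Char) : List Char :=
  let i := pvBpivot a ((a.length : Int) - 1)
  let rev := (PySem.List.slice a (some i) none).reverse
  if i = 0 then rev
  else
    let pre := PySem.List.slice a none (some (i - 1))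
    let pivot := PySem.List.pyGetD a (i - 1) ' '
    -- t = next(idx for idx, x in enumerate(rev) if x > pivot); such an x always exists
    -- when _next_perm is reached with i > 0 (StopIteration unreachable)
    let t : Int := ((rev.findIdx (fun x => decide (pivot < x)) : Nat) : Int)
    pre ++ [PySem.List.pyGetD rev t ' '] ++ PySem.List.slice rev none (some t)
        ++ [pivot] ++ PySem.List.slice rev (some (t + 1)) none

-- for c in num: j = a.index(c); res += j; a.pop(j)
-- (a.index raises ValueError when c ∉ a — unreachable under Pre_; the .getD branches are never taken)
def pvBcount : List Char → List Char → Int → Int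
  | [], _, res => res
  | c :: rest, a, res =>
    let j := (PySem.List.index? a c).getD 0
    pvBcount rest (((PySem.List.pop? a (j : Int)).map Prod.snd).getD a) (res + (j : Int))

def getMinSwaps_alt (num : String) (k : Int) : Int :=
  let a := (PySem.List.pyRange 0 k 1).foldl (fun x _ => pvBnextPerm x) num.toList
  pvBcount num.toList a 0

-- ===== PRECONDITION & SPEC =====
-- Pre_ excludes only the empty string together with k ≥ 1: there A's next_permu
-- (and B's _next_perm alike) raises IndexError.
def Pre_getMinSwaps (num : String) (k : Int) : Prop := num ≠ "" ∨ k ≤ 0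
instance (num : String) (k : Int) : Decidable (Pre_getMinSwaps num k) := by
  unfold Pre_getMinSwaps; infer_instance

def pvWitness_getMinSwaps : String × Int := ("1320", 3)

def Spec_getMinSwaps (num : String) (k : Int) (out : Int) : Prop := out = getMinSwaps_alt num k
instance (num : String) (k : Int) (out : Int) : Decidable (Spec_getMinSwaps num k out) := by
  unfold Spec_getMinSwaps; infer_instance

-- ===== CLAIM (what is proved, stated in full; the proofs are below) =====
def Claim_equal_getMinSwaps : Prop := ∀ (num : String) (k : Int),
  Dom_getMinSwaps num k → Pre_getMinSwaps num k → Spec_getMinSwaps num k (getMinSwaps num k)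

-- ===== LEMMAS AND PROOFS =====
lemma pvAsmall_le (a : List Char) (s : Int) : pvAsmall a s ≤ s := by
  fun_induction pvAsmall a s with
  | case1 s h ih => omega
  | case2 s h => omega

lemma pvAsmall_lb (a : List Char) (s : Int) (h : -1 ≤ s) : -1 ≤ pvAsmall a s := by
  fun_induction pvAsmall a s with
  | case1 s h ih => exact ih (by omega)
  | case2 s h => omega

lemma pvAsmall_exit (a : List Char) (s : Int) :
    ¬ (0 ≤ pvAsmall a s ∧
       PySem.List.pyGetD a (pvAsmall a s + 1) ' ' ≤ PySem.List.pyGetD a (pvAsmall a s) ' ') := by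
  fun_induction pvAsmall a s with
  | case1 s h ih => exact ih
  | case2 s h => exact h

lemma pvBpivot_eq_pvAsmall (a : List Char) (s : Int) : pvBpivot a (s + 1) = pvAsmall a s + 1 := by
  fun_induction pvAsmall a s with
  | case1 s h ih =>
    have e : s + 1 - 1 = s := by ring
    have e2 : s - 1 + 1 = s := by ring
    rw [pvBpivot, e, dif_pos ⟨by omega, h.2⟩]
    rw [e2] at ih
    exact ih
  | case2 s h =>
    have e : s + 1 - 1 = s := by ring
    rw [pvBpivot, e, dif_neg (fun hc => h ⟨by omega, hc.2⟩)]

lemma pv_reverse_set {α : Type} (l : List α) (i : Nat) (h : i < l.length) (v : α) :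
    (l.set i v).reverse = l.reverse.set (l.length - 1 - i) v := by
  apply List.ext_getElem
  · simp
  · intro u h1 h2
    simp only [List.length_reverse, List.length_set] at h1 h2
    rw [List.getElem_reverse, List.getElem_set, List.getElem_set, List.getElem_reverse]
    simp only [List.length_set]
    by_cases hu : i = l.length - 1 - u
    · rw [if_pos hu, if_pos (by omega)]
    · rw [if_neg hu, if_neg (by omega)]

lemma pv_drop_rev_getElem (a : List Char) (i u : Nat) (h : i + u + 1 ≤ a.length) :
    ((a.drop i).reverse)[u]'(by simp; omega) = a[a.length - 1 - u]'(by omega) := by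
  rw [List.getElem_reverse, List.getElem_drop]
  congr 1
  simp
  omega

lemma nextPerm_eq_perm (a : List Char) (h : a ≠ []) :
    pvAnextPermu (a.length : Int) a = pvBnextPerm a ∧ (pvBnextPerm a).Perm a := by
  have hn : 0 < a.length := List.length_pos_iff.mpr h
  unfold pvAnextPermu pvBnextPerm
  have hBA : pvBpivot a ((a.length : Int) - 1) = pvAsmall a ((a.length : Int) - 2) + 1 := by
    have h2 := pvBpivot_eq_pvAsmall a ((a.length : Int) - 2)
    rw [show ((a.length : Int) - 2) + 1 = (a.length : Int) - 1 by ring] at h2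
    exact h2
  rw [hBA]
  set small := pvAsmall a ((a.length : Int) - 2) with hsm
  have hlb := pvAsmall_lb a ((a.length : Int) - 2) (by omega)
  have hub := pvAsmall_le a ((a.length : Int) - 2)
  have hexit := pvAsmall_exit a ((a.length : Int) - 2)
  rw [← hsm] at hlb hub hexit
  by_cases hneg : small = -1
  · rw [hneg]
    constructor
    · norm_num [PySem.List.slice_zero_start, PySem.List.slice_none_none]
    · norm_num [PySem.List.slice_zero_start, PySem.List.slice_none_none]
  · have hpos : 0 ≤ small := by omega
    rw [if_neg hneg, if_neg (by omega)]
    obtain ⟨isn, hisn⟩ : ∃ isn : Nat, small = (isn : Int) := ⟨small.toNat, by omega⟩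
    have hlen : isn + 2 ≤ a.length := by omega
    rw [hisn] at hexit ⊢
    rw [show ((isn : Int) + 1 - 1) = ((isn : Nat) : Int) by ring]
    rw [show ((isn : Int) + 1) = ((isn + 1 : Nat) : Int) by push_cast; ring]
    rw [PySem.List.slice_from_natCast a (isn + 1), PySem.List.slice_to_natCast,
        PySem.List.pyGetD_natCast]
    set S := a.drop (isn + 1) with hS
    set rev := S.reverse with hrev
    have hm : S.length = a.length - (isn + 1) := by simp [hS]
    have hgd : a.getD isn ' ' = a[isn]'(by omega) := List.getD_eq_getElem a ' ' (by omega)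
    rw [hgd]
    set cs := a[isn]'(by omega) with hcs
    -- the exit condition: a[isn] < a[isn+1]
    have hlt : cs < a[isn + 1]'(by omega) := by
      have h1 : ¬ PySem.List.pyGetD a (↑isn + 1) ' ' ≤ PySem.List.pyGetD a ↑isn ' ' := by
        intro hc; exact hexit ⟨by omega, hc⟩
      rw [show ((isn : Int) + 1) = ((isn + 1 : Nat) : Int) by push_cast; ring,
          PySem.List.pyGetD_natCast, PySem.List.pyGetD_natCast,
          List.getD_eq_getElem a ' ' (by omega : isn + 1 < a.length),
          List.getD_eq_getElem a ' ' (by omega : isn < a.length)] at h1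
      exact lt_of_not_ge h1
    -- index correspondence for rev
    have hrevu : ∀ u, (hu : u < S.length) →
        rev[u]'(by simpa [hrev] using hu) = a[a.length - 1 - u]'(by omega) := by
      intro u hu
      exact pv_drop_rev_getElem a (isn + 1) u (by simp [hS] at hu; omega)
    -- findIdx facts
    set tn := rev.findIdx (fun x => decide (cs < x)) with htn
    have htnlt : tn < S.length := by
      have : tn < rev.length := List.findIdx_lt_length.mpr
        ⟨a[isn + 1]'(by omega), by
          constructor
          · have h0 : S[0]'(by omega) = a[isn + 1]'(by omega) := by
              have : (List.drop (isn + 1) a)[0]'(by simp; omega) = a[isn + 1 + 0]'(by omega) :=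
                List.getElem_drop
              simpa [hS] using this
            rw [hrev, List.mem_reverse, ← h0]
            exact List.getElem_mem _
          · simpa using hlt⟩
      simpa [hrev] using this
    have htnsat : cs < rev[tn]'(by simpa [hrev] using htnlt) := by
      have := @List.findIdx_getElem _ (fun x => decide (cs < x)) rev (by simpa [hrev] using htnlt)
      simpa [htn] using this
    have htnmin : ∀ u, (hu : u < tn) → ¬ (cs < rev[u]'(by simp only [hrev, List.length_reverse]; omega)) := by
      intro u hu
      have := @List.not_of_lt_findIdx _ (fun x => decide (cs < x)) rev u (by simpa [htn] using hu)
      simpa using this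
    have hmS : S.length = a.length - (isn + 1) := by simp [hS]
    have hrn1 : isn + 1 ≤ a.length - 1 - tn := by omega
    have hrn2 : a.length - 1 - tn < a.length := by omega
    -- A's for/break search returns the a-index matching rev's findIdx
    have hfind : List.find? (fun i => decide (cs < PySem.List.pyGetD a i ' '))
        (PySem.List.pyRange ((a.length : Int) - 1) (isn : Int) (-1))
        = some ((a.length - 1 - tn : Nat) : Int) := by
      apply List.find?_eq_some_iff_append.mpr
      refine ⟨?_, (PySem.List.pyRange (((a.length - 1 - tn : Nat) : Int) + 1) (a.length : Int) 1).reverse,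
             (PySem.List.pyRange ((isn : Int) + 1) ((a.length - 1 - tn : Nat) : Int) 1).reverse, ?_, ?_⟩
      · rw [PySem.List.pyGetD_natCast, List.getD_eq_getElem a ' ' hrn2]
        have h2 := hrevu tn htnlt
        simp only [decide_eq_true_eq]
        rw [← h2]
        exact htnsat
      · rw [PySem.List.pyRange_neg_one_eq_reverse]
        rw [show ((a.length : Int) - 1 + 1) = (a.length : Int) by ring]
        rw [PySem.List.pyRange_one_append ((isn : Int) + 1) ((a.length - 1 - tn : Nat) : Int)
              (a.length : Int) (by omega) (by omega)]
        rw [PySem.List.pyRange_one_cons (by omega : ((a.length - 1 - tn : Nat) : Int) < (a.length : Int))]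
        simp [List.reverse_append, List.append_assoc]
      · intro j hj
        rw [List.mem_reverse, PySem.List.mem_pyRange_one] at hj
        obtain ⟨jn, hjn⟩ : ∃ jn : Nat, j = (jn : Int) := ⟨j.toNat, by omega⟩
        rw [hjn, PySem.List.pyGetD_natCast, List.getD_eq_getElem a ' ' (by omega)]
        simp only [Bool.not_eq_eq_eq_not, Bool.not_true, decide_eq_false_iff_not]
        have hu : a.length - 1 - jn < tn := by omega
        have h2 := hrevu (a.length - 1 - jn) (by omega)
        have h3 : a[a.length - 1 - (a.length - 1 - jn)]'(by omega) = a[jn]'(by omega) := by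
          congr 1
          omega
        rw [h3] at h2
        rw [← h2]
        exact htnmin (a.length - 1 - jn) hu
    simp only [hfind, Option.getD_some, PySem.List.pySetD_natCast, PySem.List.pyGetD_natCast,
      PySem.List.slice_to_natCast, PySem.List.slice_from_natCast]
    rw [← htn]
    rw [show ((tn : Nat) : Int) + 1 = ((tn + 1 : Nat) : Int) by push_cast; ring]
    rw [PySem.List.slice_from_natCast]
    have htnr : tn < rev.length := by simp only [hrev, List.length_reverse]; omega
    have hgd2 : rev.getD tn ' ' = rev[tn]'htnr := List.getD_eq_getElem rev ' ' htnr
    have hgd3 : a.getD (a.length - 1 - tn) ' ' = a[a.length - 1 - tn]'hrn2 :=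
      List.getD_eq_getElem a ' ' hrn2
    have hcl : a[a.length - 1 - tn]'hrn2 = rev[tn]'htnr := (hrevu tn htnlt).symm
    rw [hgd2, hgd3, hcl]
    have htake : List.take (isn + 1) ((a.set isn (rev[tn]'htnr)).set (a.length - 1 - tn) cs)
        = List.take isn a ++ [rev[tn]'htnr] := by
      rw [List.take_set, List.set_eq_of_length_le (by simp; omega), List.take_set,
          List.set_eq_take_append_cons_drop, if_pos (by simp; omega)]
      rw [List.take_take, List.drop_take]
      simp
    have hdrop : List.drop (isn + 1) ((a.set isn (rev[tn]'htnr)).set (a.length - 1 - tn) cs)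
        = S.set (S.length - 1 - tn) cs := by
      rw [List.drop_set, if_neg (by omega), List.drop_set, if_pos (by omega)]
      rw [← hS]
      congr 1
      omega
    have hfin : (S.set (S.length - 1 - tn) cs).reverse
        = List.take tn rev ++ cs :: List.drop (tn + 1) rev := by
      rw [pv_reverse_set S (S.length - 1 - tn) (by omega) cs]
      rw [show S.length - 1 - (S.length - 1 - tn) = tn by omega]
      rw [← hrev, List.set_eq_take_append_cons_drop, if_pos htnr]
    refine ⟨?_, ?_⟩
    · rw [htake, hdrop, hfin]
      simp [List.append_assoc]
    · -- the B-shaped result permutes a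
      have hadec : List.take isn a ++ cs :: S = a := by
        have h1 : List.drop isn a = cs :: S := by
          rw [List.drop_eq_getElem_cons (by omega : isn < a.length)]
        rw [← h1, List.take_append_drop]
      have hrevsplit : List.take tn rev ++ rev[tn]'htnr :: List.drop (tn + 1) rev = rev := by
        rw [show List.take tn rev ++ rev[tn]'htnr :: List.drop (tn + 1) rev
              = (List.take tn rev ++ [rev[tn]'htnr]) ++ List.drop (tn + 1) rev by
            simp]
        rw [List.take_append_getElem, List.take_append_drop]
      have hSrev : rev.Perm S := List.reverse_perm S
      have p1 : (rev[tn]'htnr :: (List.take tn rev ++ cs :: List.drop (tn + 1) rev)).Perm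
          (cs :: rev) := by
        refine List.Perm.trans (List.Perm.cons _ List.perm_middle) ?_
        refine List.Perm.trans (List.Perm.swap _ _ _) ?_
        refine List.Perm.trans (List.Perm.cons _ List.perm_middle.symm) ?_
        rw [hrevsplit]
      have heq1 : List.take isn a ++ [rev[tn]'htnr] ++ List.take tn rev ++ [cs]
            ++ List.drop (tn + 1) rev
          = List.take isn a
            ++ (rev[tn]'htnr :: (List.take tn rev ++ cs :: List.drop (tn + 1) rev)) := by
        simp [List.append_assoc]
      rw [heq1]
      refine List.Perm.trans (List.Perm.append_left _ p1) ?_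
      refine List.Perm.trans (List.Perm.append_left _ (List.Perm.cons _ hSrev)) ?_
      rw [hadec]

lemma nextPerm_eq (a : List Char) (h : a ≠ []) :
    pvAnextPermu (a.length : Int) a = pvBnextPerm a := (nextPerm_eq_perm a h).1

lemma nextPerm_perm (a : List Char) (h : a ≠ []) : (pvBnextPerm a).Perm a :=
  (nextPerm_eq_perm a h).2

lemma iter_eq (a0 : List Char) (h0 : a0 ≠ []) : ∀ (l : List Int) (a : List Char), a.Perm a0 →
    l.foldl (fun x _ => pvAnextPermu (a0.length : Int) x) a
      = l.foldl (fun x _ => pvBnextPerm x) a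
    ∧ (l.foldl (fun x _ => pvBnextPerm x) a).Perm a0 := by
  intro l
  induction l with
  | nil => intro a hp; exact ⟨rfl, hp⟩
  | cons x xs ih =>
    intro a hp
    have hne : a ≠ [] := by
      intro hnil
      rw [hnil] at hp
      exact h0 (List.perm_nil.mp hp.symm)
    have hlen : (a0.length : Int) = (a.length : Int) := by
      rw [hp.length_eq]
    rw [List.foldl_cons, List.foldl_cons]
    have hstep : pvAnextPermu (a0.length : Int) a = pvBnextPerm a := by
      rw [hlen]; exact nextPerm_eq a hne
    rw [hstep]
    exact ih (pvBnextPerm a) ((nextPerm_perm a hne).trans hp)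

lemma count_eq (tgt : List Char) : ∀ (cur done : List Char) (res : Int), cur.Perm tgt →
    ((PySem.List.pyRange (done.length : Int) ((done.length + tgt.length : Nat) : Int) 1).foldl
        (pvAstep (done ++ tgt)) (done ++ cur, res)).2 = pvBcount tgt cur res := by
  induction tgt with
  | nil =>
    intro cur done res hperm
    have hc : cur = [] := List.perm_nil.mp hperm
    subst hc
    rw [PySem.List.pyRange_one_eq_nil (by simp)]
    rfl
  | cons c rest ih =>
    intro cur done res hperm
    have hc : c ∈ cur := hperm.mem_iff.mpr (by simp)
    obtain ⟨k, hk⟩ : ∃ k, PySem.List.index? cur c = some k := by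
      have := (PySem.List.index?_isSome_iff cur c).mpr hc
      exact Option.isSome_iff_exists.mp this
    obtain ⟨pre, suf, hcur, hklen, hpre⟩ := (PySem.List.index?_eq_some_iff cur c k).mp hk
    have hkcur : k < cur.length := by rw [hcur]; simp; omega
    rw [PySem.List.pyRange_one_cons
      (by push_cast; simp : (done.length : Int) < ((done.length + (c :: rest).length : Nat) : Int))]
    rw [List.foldl_cons]
    have hstep : pvAstep (done ++ c :: rest) (done ++ cur, res) (done.length : Int)
        = ((done ++ [c]) ++ (pre ++ suf), res + (k : Int)) := by
      unfold pvAstep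
      dsimp only
      have h1 : PySem.List.pyGetD (done ++ c :: rest) (done.length : Int) ' ' = c := by
        rw [PySem.List.pyGetD_natCast, List.getD_eq_getElem _ ' ' (by simp),
            List.getElem_append_right (le_refl done.length)]
        simp
      have h2 : PySem.List.slice (done ++ cur) (some (done.length : Int)) none = cur := by
        rw [PySem.List.slice_from_natCast]
        exact List.drop_left
      have h3 : PySem.List.slice (done ++ cur) none (some (done.length : Int)) = done := by
        rw [PySem.List.slice_to_natCast]
        exact List.take_left
      have hregroup : done ++ cur = (done ++ pre) ++ c :: suf := by
        rw [hcur]; simp [List.append_assoc]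
      have h4 : PySem.List.pyGetD (done ++ cur) ((done.length : Int) + (k : Int)) ' ' = c := by
        rw [hregroup,
            show (done.length : Int) + (k : Int) = (((done ++ pre).length : Nat) : Int) by
              simp [hklen],
            PySem.List.pyGetD_natCast, List.getD_eq_getElem _ ' ' (by simp),
            List.getElem_append_right (le_refl _)]
        simp
      have h5 : PySem.List.slice (done ++ cur) (some (done.length : Int))
          (some ((done.length : Int) + (k : Int))) = pre := by
        rw [show ((done.length : Int) + (k : Int)) = (((done.length + k : Nat)) : Int) by push_cast; ring]
        rw [PySem.List.slice_natCast, List.drop_left]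
        rw [show done.length + k - done.length = k by omega]
        rw [hcur, ← hklen]
        exact List.take_left
      have h6 : PySem.List.slice (done ++ cur) (some ((done.length : Int) + (k : Int) + 1)) none
          = suf := by
        rw [show ((done.length : Int) + (k : Int) + 1) = (((done.length + k + 1 : Nat)) : Int) by
              push_cast; ring]
        rw [PySem.List.slice_from_natCast]
        have hregroup2 : done ++ cur = ((done ++ pre) ++ [c]) ++ suf := by
          rw [hcur]; simp [List.append_assoc]
        rw [hregroup2, show done.length + k + 1 = ((done ++ pre) ++ [c]).length by simp [hklen]; omega]
        exact List.drop_left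
      rw [h1, h2, hk]
      simp only [Option.getD_some]
      rw [h3, h4, h5, h6]
      rw [Prod.mk.injEq]
      constructor
      · simp [List.append_assoc]
      · ring
    rw [hstep]
    have hBstep : pvBcount (c :: rest) cur res = pvBcount rest (pre ++ suf) (res + (k : Int)) := by
      have herase : cur.eraseIdx k = pre ++ suf := by
        rw [hcur, ← hklen, List.eraseIdx_eq_take_drop_succ, List.take_left]
        congr 1
        rw [show pre.length + 1 = pre.length + 1 by rfl]
        rw [List.drop_append]
        simp
      simp only [pvBcount]
      rw [hk]
      simp only [Option.getD_some]
      rw [PySem.List.pop?_natCast cur k hkcur]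
      simp only [Option.map_some, Option.getD_some, herase]
    rw [hBstep]
    have hperm' : (pre ++ suf).Perm rest := by
      have hmid : cur.Perm (c :: (pre ++ suf)) := by
        rw [hcur]; exact List.perm_middle
      exact List.Perm.cons_inv (hmid.symm.trans hperm)
    have e1 : done ++ c :: rest = (done ++ [c]) ++ rest := by simp
    have e2 : ((done.length : Int) + 1) = (((done ++ [c]).length : Nat) : Int) := by simp
    have e3 : ((done.length + (c :: rest).length : Nat) : Int)
        = (((done ++ [c]).length + rest.length : Nat) : Int) := by simp; omega
    rw [e1, e2, e3]
    have e4 : (done ++ [c]) ++ (pre ++ suf) = (done ++ [c]) ++ (pre ++ suf) := rfl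
    exact ih (pre ++ suf) (done ++ [c]) (res + (k : Int)) hperm'

theorem main_eq (num : String) (k : Int) (hpre : num ≠ "" ∨ k ≤ 0) :
    getMinSwaps num k = getMinSwaps_alt num k := by
  unfold getMinSwaps getMinSwaps_alt
  dsimp only
  have hmain : ∀ cur : List Char, cur.Perm num.toList →
      ((PySem.List.pyRange 0 (num.toList.length : Int) 1).foldl
          (pvAstep num.toList) (cur, 0)).2 = pvBcount num.toList cur 0 := by
    intro cur hp
    have h := count_eq num.toList cur [] 0 hp
    simpa using h
  by_cases hk : k ≤ 0
  · rw [PySem.List.pyRange_one_eq_nil hk]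
    simp only [List.foldl_nil]
    exact hmain num.toList (List.Perm.refl _)
  · have hne : num ≠ "" := hpre.resolve_right hk
    have hne' : num.toList ≠ [] := by
      intro hl
      exact hne (by simpa using congrArg String.ofList hl)
    obtain ⟨heq, hperm⟩ :=
      iter_eq num.toList hne' (PySem.List.pyRange 0 k 1) num.toList (List.Perm.refl _)
    rw [heq]
    exact hmain _ hperm

-- ===== VERDICT (by name: the statement is the Claim_ definition above) =====
theorem getMinSwaps_spec : Claim_equal_getMinSwaps := by
  intro num k _ hpre
  unfold Spec_getMinSwaps
  exact main_eq num k hpre
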